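-- pv_equiv track=rewrite | github.com/PaveethraRaman/CS555WS_Team6_Fall-2022 | sprint3.py | Individual_gender_verification
-- ===== SOURCE A (Python) =====
-- def Individual_gender_verification(husband_id, wife_id, indiList):
--     husband_gender= False
--     wife_gender = False
--
--     for i in range(len(indiList)):
--         individual = indiList[i]
--         if(individual[0] == husband_id):
--             if(individual[2]=='M'):
--                 husband_gender = True
--
--         if(individual[0] == wife_id):
--             if(individual[2] == 'F'):
--                 wife_gender = True
--
--     return husband_gender& wife_gender
-- ===== SOURCE B (Python) =====
-- def Individual_gender_verification(husband_id, wife_id, indiList):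
--     # Build an id -> set-of-genders index in one pass, then answer by two lookups.
--     idx = {}
--     for ind in indiList:
--         idx.setdefault(ind[0], set()).update(ind[2:3])
--     return 'M' in idx.get(husband_id, set()) and 'F' in idx.get(wife_id, set())
-- ===== Notes on version B (the rewrite author's own statement) =====
-- stated objective: alternative
-- what changed: Replaced the flag-setting index loop by building a dict index from individual id to the set of recorded genders in one pass and then answering with two dictionary lookups, no further scanning.
import Mathlib
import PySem

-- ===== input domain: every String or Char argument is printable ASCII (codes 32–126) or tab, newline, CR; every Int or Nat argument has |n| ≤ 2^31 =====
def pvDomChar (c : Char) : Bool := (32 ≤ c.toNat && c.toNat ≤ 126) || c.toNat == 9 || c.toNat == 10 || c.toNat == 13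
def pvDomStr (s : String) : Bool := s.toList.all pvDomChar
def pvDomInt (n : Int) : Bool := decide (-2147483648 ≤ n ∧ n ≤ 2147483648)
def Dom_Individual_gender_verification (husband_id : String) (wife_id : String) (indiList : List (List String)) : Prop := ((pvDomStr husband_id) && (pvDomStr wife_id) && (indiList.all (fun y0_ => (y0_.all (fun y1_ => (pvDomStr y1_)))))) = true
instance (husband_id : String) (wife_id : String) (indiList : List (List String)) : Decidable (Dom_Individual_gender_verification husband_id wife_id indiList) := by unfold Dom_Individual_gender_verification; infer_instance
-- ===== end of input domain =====

-- B replaces A's flag-setting scan by building an id -> set-of-genders dict index in one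
-- pass and then answering with two lookups (objective: alternative decomposition).

-- ===== PORT A =====
-- one loop-body step of A: updates the (husband_gender, wife_gender) flag pair for record i
def pvStepA (husband_id wife_id : String) (indiList : List (List String))
    (st : Bool × Bool) (i : Int) : Bool × Bool :=
  let individual := (PySem.List.pyGet? indiList i).getD []
  let st1 := if PySem.List.pyGet? individual 0 = some husband_id then
               (if PySem.List.pyGet? individual 2 = some "M" then (true, st.2) else st)
             else st
  if PySem.List.pyGet? individual 0 = some wife_id then
    (if PySem.List.pyGet? individual 2 = some "F" then (st1.1, true) else st1)
  else st1

def Individual_gender_verification (husband_id : String) (wife_id : String) (indiList : List (List String)) : Bool :=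
  let st := (PySem.List.pyRange 0 indiList.length 1).foldl (pvStepA husband_id wife_id indiList) (false, false)
  st.1 && st.2

-- ===== PORT B =====
-- idx.setdefault(ind[0], set()).update(ind[2:3])  ==  modify at key ind[0], default empty set
def pvIndexB (indiList : List (List String)) : PySem.Dict String (PySem.Set String) :=
  indiList.foldl
    (fun idx ind =>
      PySem.Dict.modify idx ((PySem.List.pyGet? ind 0).getD "") PySem.Set.empty
        (fun s => PySem.Set.update s (PySem.List.slice ind (some 2) (some 3))))
    PySem.Dict.empty

def Individual_gender_verification_alt (husband_id : String) (wife_id : String) (indiList : List (List String)) : Bool :=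
  let idx := pvIndexB indiList
  decide ("M" ∈ PySem.Dict.getD idx husband_id PySem.Set.empty)
    && decide ("F" ∈ PySem.Dict.getD idx wife_id PySem.Set.empty)

-- ===== PRECONDITION & SPEC =====
-- Pre_ excludes exactly the inputs on which Python A raises IndexError: a record that is
-- empty, or a record matching one of the two ids with fewer than 3 fields.
def Pre_Individual_gender_verification (husband_id : String) (wife_id : String) (indiList : List (List String)) : Prop :=
  ∀ ind ∈ indiList, ind ≠ [] ∧ ((ind.headI = husband_id ∨ ind.headI = wife_id) → 3 ≤ ind.length)
instance (husband_id : String) (wife_id : String) (indiList : List (List String)) : Decidable (Pre_Individual_gender_verification husband_id wife_id indiList) := by unfold Pre_Individual_gender_verification; infer_instance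

def pvWitness_Individual_gender_verification : String × String × List (List String) :=
  ("H1", "W1", [["H1", "x", "M"], ["W1", "y", "F"], ["Z9", "z", "M"]])

def Spec_Individual_gender_verification (husband_id : String) (wife_id : String) (indiList : List (List String)) (out : Bool) : Prop := out = Individual_gender_verification_alt husband_id wife_id indiList
instance (husband_id : String) (wife_id : String) (indiList : List (List String)) (out : Bool) : Decidable (Spec_Individual_gender_verification husband_id wife_id indiList out) := by unfold Spec_Individual_gender_verification; infer_instance

-- ===== CLAIM (what is proved, stated in full; the proofs are below) =====
def Claim_equal_Individual_gender_verification : Prop := ∀ (husband_id : String) (wife_id : String) (indiList : List (List String)), Dom_Individual_gender_verification husband_id wife_id indiList → Pre_Individual_gender_verification husband_id wife_id indiList → Spec_Individual_gender_verification husband_id wife_id indiList (Individual_gender_verification husband_id wife_id indiList)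

-- ===== LEMMAS AND PROOFS =====

-- direct (list-valued) version of A's loop body, used only inside the proof
def pvStepD (husband_id wife_id : String) (st : Bool × Bool) (individual : List String) : Bool × Bool :=
  let st1 := if PySem.List.pyGet? individual 0 = some husband_id then
               (if PySem.List.pyGet? individual 2 = some "M" then (true, st.2) else st)
             else st
  if PySem.List.pyGet? individual 0 = some wife_id then
    (if PySem.List.pyGet? individual 2 = some "F" then (st1.1, true) else st1)
  else st1

-- folding A's step over the index range of pre ++ L, starting at |pre|, is folding pvStepD over L
lemma pvFoldA_eq_foldD (husband_id wife_id : String) (pre L : List (List String)) (st : Bool × Bool) :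
    (PySem.List.pyRange pre.length (pre.length + L.length) 1).foldl
        (pvStepA husband_id wife_id (pre ++ L)) st
      = L.foldl (pvStepD husband_id wife_id) st := by
  induction L generalizing pre st with
  | nil => simp [PySem.List.pyRange_one_eq_nil]
  | cons x L ih =>
    rw [PySem.List.pyRange_one_cons (by simp)]
    simp only [List.foldl_cons]
    have h1 : pvStepA husband_id wife_id (pre ++ x :: L) st (pre.length : Int)
        = pvStepD husband_id wife_id st x := by
      simp only [pvStepA, pvStepD, PySem.List.pyGet?_append_length, Option.getD_some]
    rw [h1]
    have h2 : pre ++ x :: L = (pre ++ [x]) ++ L := by simp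
    have h3 : ((pre.length : Int) + 1) = ((pre ++ [x]).length : Int) := by simp
    have h4 : (pre.length : Int) + (x :: L).length = ((pre ++ [x]).length : Int) + L.length := by
      simp; omega
    rw [h2, h3, h4, ih]

-- the fold computes each flag as "initial flag OR an existence check"
lemma pvFoldD_any (husband_id wife_id : String) (L : List (List String)) (a b : Bool) :
    L.foldl (pvStepD husband_id wife_id) (a, b)
      = (a || (L.any fun ind =>
            decide (PySem.List.pyGet? ind 0 = some husband_id) && decide (PySem.List.pyGet? ind 2 = some "M")),
         b || (L.any fun ind =>
            decide (PySem.List.pyGet? ind 0 = some wife_id) && decide (PySem.List.pyGet? ind 2 = some "F"))) := by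
  induction L generalizing a b with
  | nil => simp
  | cons x L ih =>
    simp only [List.foldl_cons, List.any_cons]
    have hx : pvStepD husband_id wife_id (a, b) x
        = (a || (decide (PySem.List.pyGet? x 0 = some husband_id) && decide (PySem.List.pyGet? x 2 = some "M")),
           b || (decide (PySem.List.pyGet? x 0 = some wife_id) && decide (PySem.List.pyGet? x 2 = some "F"))) := by
      simp only [pvStepD]
      split_ifs <;> simp_all
    rw [hx, ih]
    simp [Bool.or_assoc]

-- membership in B's index: g is recorded for id k iff some record has key k and g in its gender slice
lemma pvMem_indexB (L : List (List String)) (d : PySem.Dict String (PySem.Set String)) (k g : String) :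
    (g ∈ PySem.Dict.getD
        (L.foldl
          (fun idx ind =>
            PySem.Dict.modify idx ((PySem.List.pyGet? ind 0).getD "") PySem.Set.empty
              (fun s => PySem.Set.update s (PySem.List.slice ind (some 2) (some 3)))) d)
        k PySem.Set.empty)
      ↔ g ∈ PySem.Dict.getD d k PySem.Set.empty ∨
        ∃ ind ∈ L, (PySem.List.pyGet? ind 0).getD "" = k ∧ g ∈ PySem.List.slice ind (some 2) (some 3) := by
  induction L generalizing d with
  | nil => simp
  | cons x L ih =>
    simp only [List.foldl_cons]
    rw [ih]
    rw [PySem.Dict.getD_modify]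
    by_cases hk : k = (PySem.List.pyGet? x 0).getD ""
    · simp [hk, PySem.Set.mem_update]
      tauto
    · simp only [if_neg hk]
      constructor
      · rintro (h | h)
        · exact Or.inl h
        · exact Or.inr (by obtain ⟨ind, h1, h2, h3⟩ := h; exact ⟨ind, List.mem_cons_of_mem _ h1, h2, h3⟩)
      · rintro (h | ⟨ind, hmem, h2, h3⟩)
        · exact Or.inl h
        · rcases List.mem_cons.1 hmem with rfl | hmem'
          · exact absurd h2.symm hk
          · exact Or.inr ⟨ind, hmem', h2, h3⟩

-- under Pre_, the index lookup for an id agrees with A's existence check for that id and gender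
lemma pvLookup_eq_any (husband_id wife_id : String) (L : List (List String))
    (hpre : Pre_Individual_gender_verification husband_id wife_id L)
    (k g : String) (hk : k = husband_id ∨ k = wife_id) :
    decide (g ∈ PySem.Dict.getD (pvIndexB L) k PySem.Set.empty)
      = L.any fun ind =>
          decide (PySem.List.pyGet? ind 0 = some k) && decide (PySem.List.pyGet? ind 2 = some g) := by
  have h := pvMem_indexB L PySem.Dict.empty k g
  unfold pvIndexB
  rw [Bool.eq_iff_iff, decide_eq_true_iff, h, List.any_eq_true]
  simp only [PySem.Dict.getD_empty, PySem.Set.empty, List.not_mem_nil, false_or,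
    Bool.and_eq_true, decide_eq_true_iff]
  constructor
  · rintro ⟨ind, hmem, hkey, hg⟩
    obtain ⟨hne, hlen⟩ := hpre ind hmem
    obtain ⟨a, tl, rfl⟩ := List.exists_cons_of_ne_nil hne
    have hkey' : a = k := by simpa [pysem] using hkey
    subst hkey'
    have h3 : 3 ≤ (a :: tl).length := by
      apply hlen; simpa [List.headI] using hk
    rcases tl with _ | ⟨b, _ | ⟨c, tl3⟩⟩ <;> simp at h3
    have hslice : PySem.List.slice (a :: b :: c :: tl3) (some 2) (some 3) = [c] := by
      have := PySem.List.slice_natCast (a :: b :: c :: tl3) 2 3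
      simpa using this
    rw [hslice] at hg
    simp only [List.mem_singleton] at hg
    subst hg
    exact ⟨a :: b :: g :: tl3, hmem, by simp [pysem], by simp [pysem]⟩
  · rintro ⟨ind, hmem, h0, h2⟩
    obtain ⟨hne, hlen⟩ := hpre ind hmem
    obtain ⟨a, tl, rfl⟩ := List.exists_cons_of_ne_nil hne
    have hak : a = k := by simp [pysem] at h0; exact h0
    have h3 : 3 ≤ (a :: tl).length := by
      apply hlen; simp only [List.headI, hak]; tauto
    rcases tl with _ | ⟨b, _ | ⟨c, tl3⟩⟩ <;> simp at h3
    have hcg : c = g := by simp [pysem] at h2; exact h2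
    have hslice : PySem.List.slice (a :: b :: c :: tl3) (some 2) (some 3) = [c] := by
      have := PySem.List.slice_natCast (a :: b :: c :: tl3) 2 3
      simpa using this
    refine ⟨a :: b :: c :: tl3, hmem, by simp [pysem, hak], ?_⟩
    rw [hslice]; simp [hcg]

-- ===== VERDICT (by name: the statement is the Claim_ definition above) =====
theorem Individual_gender_verification_spec : Claim_equal_Individual_gender_verification := by
  intro husband_id wife_id indiList _ hpre
  unfold Spec_Individual_gender_verification Individual_gender_verification Individual_gender_verification_alt
  have hA := pvFoldA_eq_foldD husband_id wife_id [] indiList (false, false)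
  simp only [List.nil_append, List.length_nil, Nat.cast_zero, zero_add] at hA
  rw [hA, pvFoldD_any]
  simp only [Bool.false_or]
  rw [pvLookup_eq_any husband_id wife_id indiList hpre husband_id "M" (Or.inl rfl),
      pvLookup_eq_any husband_id wife_id indiList hpre wife_id "F" (Or.inr rfl)]
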